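-- pv_equiv track=rewrite | github.com/AlexLu0419/han-script-classification | render_font_chars.py | is_interesting_codepoint
-- ===== SOURCE A (Python) =====
-- def is_interesting_codepoint(cp: int) -> bool:
--     """
--     Decide whether we care about this codepoint.
--     You can tweak these ranges as needed.
--
--     Currently includes:
--     - CJK Unified Ideographs + Extension A
--     - CJK Compatibility Ideographs
--     - Hiragana, Katakana
--     - Hangul syllables + Jamo
--     - CJK symbols & punctuation, fullwidth forms
--     """
--     ranges = [
--         (0x3400, 0x4DBF),  # CJK Unified Ideographs Extension A
--         (0x4E00, 0x9FFF),  # CJK Unified Ideographs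
--         (0xF900, 0xFAFF),  # CJK Compatibility Ideographs
--         (0x3040, 0x309F),  # Hiragana
--         (0x30A0, 0x30FF),  # Katakana
--         (0xAC00, 0xD7A3),  # Hangul Syllables
--         (0x1100, 0x11FF),  # Hangul Jamo
--         (0x3000, 0x303F),  # CJK Symbols and Punctuation
--         (0xFF00, 0xFFEF),  # Halfwidth and Fullwidth Forms
--     ]
--     for start, end in ranges:
--         if start <= cp <= end:
--             return True
--     return False
-- ===== SOURCE B (Python) =====
-- import bisect
--
-- # Flat sorted boundary table: for each (start, end) range, start and end+1.
-- # Ranges listed in ascending order of start (they are disjoint).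
-- _BOUNDS = [
--     0x1100, 0x1200,  # Hangul Jamo
--     0x3000, 0x3040,  # CJK Symbols and Punctuation
--     0x3040, 0x30A0,  # Hiragana
--     0x30A0, 0x3100,  # Katakana
--     0x3400, 0x4DC0,  # CJK Unified Ideographs Extension A
--     0x4E00, 0xA000,  # CJK Unified Ideographs
--     0xAC00, 0xD7A4,  # Hangul Syllables
--     0xF900, 0xFB00,  # CJK Compatibility Ideographs
--     0xFF00, 0xFFF0,  # Halfwidth and Fullwidth Forms
-- ]
--
-- def is_interesting_codepoint(cp: int) -> bool:
--     # cp is inside one of the half-open intervals iff bisect lands at an odd index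
--     return bisect.bisect_right(_BOUNDS, cp) % 2 == 1
-- ===== Notes on version B (the rewrite author's own statement) =====
-- stated objective: alternative
-- what changed: Replaced the linear scan over the (start,end) range list with a single binary search (bisect_right) over a precomputed sorted boundary table, returning True iff the insertion index is odd.
import Mathlib
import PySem

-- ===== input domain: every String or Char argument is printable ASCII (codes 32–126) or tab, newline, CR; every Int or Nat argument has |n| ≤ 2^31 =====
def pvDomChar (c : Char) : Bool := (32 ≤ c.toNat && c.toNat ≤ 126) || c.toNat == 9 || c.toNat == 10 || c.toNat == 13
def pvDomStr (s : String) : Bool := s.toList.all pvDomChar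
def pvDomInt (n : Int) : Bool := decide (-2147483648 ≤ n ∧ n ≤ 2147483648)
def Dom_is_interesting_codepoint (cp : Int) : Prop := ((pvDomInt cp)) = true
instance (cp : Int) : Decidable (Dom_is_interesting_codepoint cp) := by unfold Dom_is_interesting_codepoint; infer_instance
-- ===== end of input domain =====

-- B replaces A's per-range linear scan by one binary search over a sorted boundary table (alternative decomposition; same result).
-- ===== PORT A =====
-- the literal list of (start, end) ranges from A
def pvRangesA : List (Int × Int) :=
  [(0x3400, 0x4DBF), (0x4E00, 0x9FFF), (0xF900, 0xFAFF), (0x3040, 0x309F),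
   (0x30A0, 0x30FF), (0xAC00, 0xD7A3), (0x1100, 0x11FF), (0x3000, 0x303F),
   (0xFF00, 0xFFEF)]

-- the for-loop with early return: recurse down the range list
def pvScanA (cp : Int) : List (Int × Int) → Bool
  | [] => false
  | (s, e) :: rest => if s ≤ cp ∧ cp ≤ e then true else pvScanA cp rest

def is_interesting_codepoint (cp : Int) : Bool := pvScanA cp pvRangesA

-- ===== PORT B =====
-- sorted boundary table: start and end+1 of each range, ascending
def pvBounds : List Int :=
  [0x1100, 0x1200, 0x3000, 0x3040, 0x3040, 0x30A0, 0x30A0, 0x3100,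
   0x3400, 0x4DC0, 0x4E00, 0xA000, 0xAC00, 0xD7A4, 0xF900, 0xFB00,
   0xFF00, 0xFFF0]

-- bisect.bisect_right: binary search (lo/hi loop), fuel = hi-lo bound;
-- a.getD mid 0 is exact here since mid is always in range
def pvBisectRight (a : List Int) (x : Int) : Nat → Nat → Nat → Nat
  | 0, lo, _ => lo
  | fuel + 1, lo, hi =>
    if lo < hi then
      let mid := (lo + hi) / 2
      if x < a.getD mid 0 then pvBisectRight a x fuel lo mid
      else pvBisectRight a x fuel (mid + 1) hi
    else lo

def is_interesting_codepoint_alt (cp : Int) : Bool :=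
  pvBisectRight pvBounds cp pvBounds.length 0 pvBounds.length % 2 == 1

-- ===== PRECONDITION & SPEC =====
def Spec_is_interesting_codepoint (cp : Int) (out : Bool) : Prop := out = is_interesting_codepoint_alt cp
instance (cp : Int) (out : Bool) : Decidable (Spec_is_interesting_codepoint cp out) := by unfold Spec_is_interesting_codepoint; infer_instance

-- ===== CLAIM (what is proved, stated in full; the proofs are below) =====
def Claim_equal_is_interesting_codepoint : Prop := ∀ (cp : Int), Dom_is_interesting_codepoint cp → Spec_is_interesting_codepoint cp (is_interesting_codepoint cp)

-- ===== LEMMAS AND PROOFS =====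

-- A's scan over the concrete range list, as one decidable disjunction
theorem pvScanA_spec (cp : Int) :
    pvScanA cp pvRangesA =
      decide ((0x3400 ≤ cp ∧ cp ≤ 0x4DBF) ∨ (0x4E00 ≤ cp ∧ cp ≤ 0x9FFF) ∨
        (0xF900 ≤ cp ∧ cp ≤ 0xFAFF) ∨ (0x3040 ≤ cp ∧ cp ≤ 0x309F) ∨
        (0x30A0 ≤ cp ∧ cp ≤ 0x30FF) ∨ (0xAC00 ≤ cp ∧ cp ≤ 0xD7A3) ∨
        (0x1100 ≤ cp ∧ cp ≤ 0x11FF) ∨ (0x3000 ≤ cp ∧ cp ≤ 0x303F) ∨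
        (0xFF00 ≤ cp ∧ cp ≤ 0xFFEF)) := by
  simp only [pvRangesA, pvScanA]
  split_ifs <;> simp_all

-- invariant of the binary-search loop: the returned index r lies in [lo,hi],
-- everything below r is ≤ x, everything from r on is > x
theorem pvBisectRight_invariant (a : List Int) (x : Int)
    (hsort : a.Pairwise (· ≤ ·)) :
    ∀ (fuel lo hi : Nat), hi - lo ≤ fuel → lo ≤ hi → hi ≤ a.length →
    (∀ i, i < lo → a.getD i 0 ≤ x) →
    (∀ i, hi ≤ i → i < a.length → x < a.getD i 0) →
    lo ≤ pvBisectRight a x fuel lo hi ∧ pvBisectRight a x fuel lo hi ≤ hi ∧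
    (∀ i, i < pvBisectRight a x fuel lo hi → a.getD i 0 ≤ x) ∧
    (∀ i, pvBisectRight a x fuel lo hi ≤ i → i < a.length → x < a.getD i 0) := by
  intro fuel
  induction fuel with
  | zero =>
    intro lo hi hf hlh hlen h1 h2
    have : lo = hi := by omega
    subst this
    simp only [pvBisectRight]
    exact ⟨le_refl _, le_refl _, h1, h2⟩
  | succ n ih =>
    intro lo hi hf hlh hlen h1 h2
    by_cases hlt : lo < hi
    · have hmid1 : lo ≤ (lo + hi) / 2 := by omega
      have hmid2 : (lo + hi) / 2 < hi := by omega
      have hmlen : (lo + hi) / 2 < a.length := by omega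
      rw [pvBisectRight, if_pos hlt]
      by_cases hx : x < a.getD ((lo + hi) / 2) 0
      · rw [if_pos hx]
        have h2' : ∀ i, (lo + hi) / 2 ≤ i → i < a.length → x < a.getD i 0 := by
          intro i hi1 hi2
          rcases eq_or_lt_of_le hi1 with h | h
          · exact h ▸ hx
          · have := (List.pairwise_iff_getElem.mp hsort) _ _ hmlen hi2 h
            have hg1 : a.getD ((lo + hi) / 2) 0 = a[(lo + hi) / 2] := by
              simp [List.getD_eq_getElem?_getD, List.getElem?_eq_getElem hmlen]
            have hg2 : a.getD i 0 = a[i] := by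
              simp [List.getD_eq_getElem?_getD, List.getElem?_eq_getElem hi2]
            rw [hg2]; rw [hg1] at hx; omega
        have := ih lo ((lo + hi) / 2) (by omega) hmid1 (by omega) h1 h2'
        exact ⟨this.1, by omega, this.2.2⟩
      · rw [if_neg hx]
        rw [not_lt] at hx
        have h1' : ∀ i, i < (lo + hi) / 2 + 1 → a.getD i 0 ≤ x := by
          intro i hi1
          by_cases hio : i < lo
          · exact h1 i hio
          · rcases eq_or_lt_of_le (Nat.lt_succ_iff.mp hi1) with h | h
            · exact h ▸ hx
            · have hilen : i < a.length := by omega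
              have := (List.pairwise_iff_getElem.mp hsort) _ _ hilen hmlen h
              have hg1 : a.getD ((lo + hi) / 2) 0 = a[(lo + hi) / 2] := by
                simp [List.getD_eq_getElem?_getD, List.getElem?_eq_getElem hmlen]
              have hg2 : a.getD i 0 = a[i] := by
                simp [List.getD_eq_getElem?_getD, List.getElem?_eq_getElem hilen]
              rw [hg2]; rw [hg1] at hx; omega
        have := ih ((lo + hi) / 2 + 1) hi (by omega) (by omega) hlen h1' h2
        exact ⟨by omega, this.2.1, this.2.2⟩
    · have : lo = hi := by omega
      subst this
      rw [pvBisectRight, if_neg hlt]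
      exact ⟨le_refl _, le_refl _, h1, h2⟩

theorem is_interesting_codepoint_spec : Claim_equal_is_interesting_codepoint := by
  intro cp _
  unfold Spec_is_interesting_codepoint is_interesting_codepoint is_interesting_codepoint_alt
  have hsort : pvBounds.Pairwise (· ≤ ·) := by decide
  obtain ⟨h0, h18, hlow, hhigh⟩ :=
    pvBisectRight_invariant pvBounds cp hsort pvBounds.length 0 pvBounds.length
      (by omega) (Nat.zero_le _) (le_refl _) (by omega) (by intro i h1 h2; omega)
  rw [pvScanA_spec]
  set r := pvBisectRight pvBounds cp pvBounds.length 0 pvBounds.length with hr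
  have hlen : pvBounds.length = 18 := by decide
  rw [hlen] at h18
  have L0 : 0 < r → (4352 : Int) ≤ cp := fun h => by simpa [pvBounds, List.getD] using hlow 0 h
  have G0 : r ≤ 0 → cp < (4352 : Int) := fun h => by simpa [pvBounds, List.getD] using hhigh 0 h (by decide)
  have L1 : 1 < r → (4608 : Int) ≤ cp := fun h => by simpa [pvBounds, List.getD] using hlow 1 h
  have G1 : r ≤ 1 → cp < (4608 : Int) := fun h => by simpa [pvBounds, List.getD] using hhigh 1 h (by decide)
  have L2 : 2 < r → (12288 : Int) ≤ cp := fun h => by simpa [pvBounds, List.getD] using hlow 2 h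
  have G2 : r ≤ 2 → cp < (12288 : Int) := fun h => by simpa [pvBounds, List.getD] using hhigh 2 h (by decide)
  have L3 : 3 < r → (12352 : Int) ≤ cp := fun h => by simpa [pvBounds, List.getD] using hlow 3 h
  have G3 : r ≤ 3 → cp < (12352 : Int) := fun h => by simpa [pvBounds, List.getD] using hhigh 3 h (by decide)
  have L4 : 4 < r → (12352 : Int) ≤ cp := fun h => by simpa [pvBounds, List.getD] using hlow 4 h
  have G4 : r ≤ 4 → cp < (12352 : Int) := fun h => by simpa [pvBounds, List.getD] using hhigh 4 h (by decide)
  have L5 : 5 < r → (12448 : Int) ≤ cp := fun h => by simpa [pvBounds, List.getD] using hlow 5 h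
  have G5 : r ≤ 5 → cp < (12448 : Int) := fun h => by simpa [pvBounds, List.getD] using hhigh 5 h (by decide)
  have L6 : 6 < r → (12448 : Int) ≤ cp := fun h => by simpa [pvBounds, List.getD] using hlow 6 h
  have G6 : r ≤ 6 → cp < (12448 : Int) := fun h => by simpa [pvBounds, List.getD] using hhigh 6 h (by decide)
  have L7 : 7 < r → (12544 : Int) ≤ cp := fun h => by simpa [pvBounds, List.getD] using hlow 7 h
  have G7 : r ≤ 7 → cp < (12544 : Int) := fun h => by simpa [pvBounds, List.getD] using hhigh 7 h (by decide)
  have L8 : 8 < r → (13312 : Int) ≤ cp := fun h => by simpa [pvBounds, List.getD] using hlow 8 h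
  have G8 : r ≤ 8 → cp < (13312 : Int) := fun h => by simpa [pvBounds, List.getD] using hhigh 8 h (by decide)
  have L9 : 9 < r → (19904 : Int) ≤ cp := fun h => by simpa [pvBounds, List.getD] using hlow 9 h
  have G9 : r ≤ 9 → cp < (19904 : Int) := fun h => by simpa [pvBounds, List.getD] using hhigh 9 h (by decide)
  have L10 : 10 < r → (19968 : Int) ≤ cp := fun h => by simpa [pvBounds, List.getD] using hlow 10 h
  have G10 : r ≤ 10 → cp < (19968 : Int) := fun h => by simpa [pvBounds, List.getD] using hhigh 10 h (by decide)
  have L11 : 11 < r → (40960 : Int) ≤ cp := fun h => by simpa [pvBounds, List.getD] using hlow 11 h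
  have G11 : r ≤ 11 → cp < (40960 : Int) := fun h => by simpa [pvBounds, List.getD] using hhigh 11 h (by decide)
  have L12 : 12 < r → (44032 : Int) ≤ cp := fun h => by simpa [pvBounds, List.getD] using hlow 12 h
  have G12 : r ≤ 12 → cp < (44032 : Int) := fun h => by simpa [pvBounds, List.getD] using hhigh 12 h (by decide)
  have L13 : 13 < r → (55204 : Int) ≤ cp := fun h => by simpa [pvBounds, List.getD] using hlow 13 h
  have G13 : r ≤ 13 → cp < (55204 : Int) := fun h => by simpa [pvBounds, List.getD] using hhigh 13 h (by decide)
  have L14 : 14 < r → (63744 : Int) ≤ cp := fun h => by simpa [pvBounds, List.getD] using hlow 14 h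
  have G14 : r ≤ 14 → cp < (63744 : Int) := fun h => by simpa [pvBounds, List.getD] using hhigh 14 h (by decide)
  have L15 : 15 < r → (64256 : Int) ≤ cp := fun h => by simpa [pvBounds, List.getD] using hlow 15 h
  have G15 : r ≤ 15 → cp < (64256 : Int) := fun h => by simpa [pvBounds, List.getD] using hhigh 15 h (by decide)
  have L16 : 16 < r → (65280 : Int) ≤ cp := fun h => by simpa [pvBounds, List.getD] using hlow 16 h
  have G16 : r ≤ 16 → cp < (65280 : Int) := fun h => by simpa [pvBounds, List.getD] using hhigh 16 h (by decide)
  have L17 : 17 < r → (65520 : Int) ≤ cp := fun h => by simpa [pvBounds, List.getD] using hlow 17 h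
  have G17 : r ≤ 17 → cp < (65520 : Int) := fun h => by simpa [pvBounds, List.getD] using hhigh 17 h (by decide)
  clear hlow hhigh hr h0
  interval_cases r <;> simp_all <;> omega
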